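-- pv_equiv track=rewrite | github.com/thunlp/ToLeaP | src/data/Toolllm_sharegpt.py | rearrange_conversations
-- ===== SOURCE A (Python) =====
-- def rearrange_conversations(data): # Meet parity requirements
--     for item in data:
--         conversations = item.get('conversations', [])
--
--         odd_conversations = [conv for conv in conversations if conv.get('from') in ['user', 'function']]
--         even_conversations = [conv for conv in conversations if conv.get('from') in ['assistant']]
--
--         rearranged = []
--         max_length = max(len(odd_conversations), len(even_conversations))
--
--         for i in range(max_length):
--             if i < len(odd_conversations): # Odd digits
--                 rearranged.append(odd_conversations[i])
--             else:
--                 rearranged.append({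
--                     "from": "user",
--                     "value": ""
--                 })
--             if i < len(even_conversations): # Even bits
--                 rearranged.append(even_conversations[i])
--             else:
--                 rearranged.append({
--                     "from": "assistant",
--                     "value": ""
--                 })
--         item['conversations'] = rearranged
--     return data
-- ===== SOURCE B (Python) =====
-- def rearrange_conversations(data):  # alternative: compute each turn's target slot number in one pass, then fill the slot table
--     for item in data:
--         slots = {}
--         n_odd = n_even = 0
--         for conv in item.get('conversations', []):
--             role = conv.get('from')
--             if role in ('user', 'function'):
--                 slots[2 * n_odd] = conv
--                 n_odd += 1
--             elif role == 'assistant':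
--                 slots[2 * n_even + 1] = conv
--                 n_even += 1
--         item['conversations'] = [
--             slots.get(i, {"from": "user", "value": ""} if i % 2 == 0 else {"from": "assistant", "value": ""})
--             for i in range(2 * max(n_odd, n_even))
--         ]
--     return data
-- ===== Notes on version B (the rewrite author's own statement) =====
-- stated objective: alternative
-- what changed: Replaces A's two filtered role lists interleaved by an indexed loop with per-position bounds checks by a single pass that assigns each turn a target slot number (2*n_odd or 2*n_even+1) in a slot dict, then fills range(2*max) from the dict with parity-chosen padding defaults.
import Mathlib
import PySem

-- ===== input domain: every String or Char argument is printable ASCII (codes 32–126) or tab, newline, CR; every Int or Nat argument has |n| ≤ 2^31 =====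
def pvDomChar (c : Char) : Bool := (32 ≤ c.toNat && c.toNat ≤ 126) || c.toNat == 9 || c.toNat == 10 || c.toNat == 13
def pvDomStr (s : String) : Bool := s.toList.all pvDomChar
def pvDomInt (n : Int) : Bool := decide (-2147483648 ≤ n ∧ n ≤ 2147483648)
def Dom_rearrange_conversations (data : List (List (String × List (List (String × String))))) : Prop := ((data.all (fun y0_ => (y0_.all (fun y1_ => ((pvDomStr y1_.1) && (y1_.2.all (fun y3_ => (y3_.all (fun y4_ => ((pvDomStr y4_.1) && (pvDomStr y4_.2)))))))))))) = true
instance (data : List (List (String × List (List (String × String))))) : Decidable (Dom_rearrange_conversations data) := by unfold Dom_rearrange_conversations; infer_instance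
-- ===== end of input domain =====

-- B replaces A's two filtered role lists plus indexed interleaving loop by a single pass that assigns
-- each turn its target slot number in a slot dict, then fills range(2*max) from that dict (alternative).
-- Both Pythons mutate each item dict in place and return data; the equivalence proved is about the return value.

-- shared helpers: the two padding turns and "conv.get('from') in names"
def pvPadUser : List (String × String) := [("from", "user"), ("value", "")]
def pvPadAsst : List (String × String) := [("from", "assistant"), ("value", "")]
def pvFromIn (conv : List (String × String)) (names : List String) : Bool :=
  match (PySem.Dict.mk conv).get? "from" with
  | some s => names.contains s
  | none => false

-- ===== PORT A =====
-- odd_conversations[i] guarded by i < len, else the padding dict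
def pvPickOdd (odd : List (List (String × String))) (i : Nat) : List (String × String) :=
  if i < odd.length then odd.getD i [] else pvPadUser
def pvPickEven (even : List (List (String × String))) (i : Nat) : List (String × String) :=
  if i < even.length then even.getD i [] else pvPadAsst

def rearrange_conversations (data : List (List (String × List (List (String × String))))) : List (List (String × List (List (String × String)))) :=
  data.map (fun item =>
    let conversations := ((PySem.Dict.mk item).get? "conversations").getD []
    let odd := conversations.filter (fun c => pvFromIn c ["user", "function"])
    let even := conversations.filter (fun c => pvFromIn c ["assistant"])
    let maxLength := Nat.max odd.length even.length
    let rearranged := (List.range maxLength).foldl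
      (fun acc i => (acc ++ [pvPickOdd odd i]) ++ [pvPickEven even i]) []
    ((PySem.Dict.mk item).insert "conversations" rearranged).items)

-- ===== PORT B =====
-- one pass: slots[2*n_odd] / slots[2*n_even+1] assignments, counters; then the range fill with
-- parity-chosen defaults
def pvSlotStep (s : PySem.Dict Int (List (String × String)) × Int × Int) (conv : List (String × String)) : PySem.Dict Int (List (String × String)) × Int × Int :=
  if pvFromIn conv ["user", "function"] then (s.1.insert (2 * s.2.1) conv, s.2.1 + 1, s.2.2)
  else if pvFromIn conv ["assistant"] then (s.1.insert (2 * s.2.2 + 1) conv, s.2.1, s.2.2 + 1)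
  else s

def rearrange_conversations_alt (data : List (List (String × List (List (String × String))))) : List (List (String × List (List (String × String)))) :=
  data.map (fun item =>
    let st := (((PySem.Dict.mk item).get? "conversations").getD []).foldl pvSlotStep
      (PySem.Dict.empty, 0, 0)
    let merged := (PySem.List.pyRange 0 (2 * max st.2.1 st.2.2) 1).map (fun i =>
      st.1.getD i (if PySem.Int.mod i 2 = 0 then pvPadUser else pvPadAsst))
    ((PySem.Dict.mk item).insert "conversations" merged).items)

-- ===== PRECONDITION & SPEC =====
def Spec_rearrange_conversations (data : List (List (String × List (List (String × String))))) (out : List (List (String × List (List (String × String))))) : Prop := out = rearrange_conversations_alt data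
instance (data : List (List (String × List (List (String × String))))) (out : List (List (String × List (List (String × String))))) : Decidable (Spec_rearrange_conversations data out) := by unfold Spec_rearrange_conversations; infer_instance

-- ===== CLAIM (what is proved, stated in full; the proofs are below) =====
def Claim_equal_rearrange_conversations : Prop := ∀ (data : List (List (String × List (List (String × String))))), Dom_rearrange_conversations data → Spec_rearrange_conversations data (rearrange_conversations data)

-- ===== LEMMAS AND PROOFS =====

theorem pv_excl (c : List (String × String)) (h : pvFromIn c ["user", "function"] = true) :
    pvFromIn c ["assistant"] = false := by
  unfold pvFromIn at *
  cases hg : (PySem.Dict.mk c).get? "from" with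
  | none => rfl
  | some s =>
    rw [hg] at h
    simp only [List.contains_eq_mem, List.mem_cons, List.not_mem_nil, or_false, decide_eq_true_eq] at h ⊢
    rcases h with h | h <;> subst h <;> decide

theorem pv_foldl_flat2 {α : Type} (g h : α → List (String × String))
    (l : List α) (acc : List (List (String × String))) :
    l.foldl (fun acc x => (acc ++ [g x]) ++ [h x]) acc = acc ++ l.flatMap (fun x => [g x, h x]) := by
  induction l generalizing acc with
  | nil => simp
  | cons x t ih =>
    simp only [List.foldl_cons, List.flatMap_cons, ih]
    simp [List.append_assoc]

-- characterisation of B's single-pass slot fold: counters count the two roles, and every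
-- nonnegative key reads back the corresponding filtered element (none beyond it)
theorem pv_fold (l : List (List (String × String))) :
    ∀ (d : PySem.Dict Int (List (String × String))) (a b : Int), 0 ≤ a → 0 ≤ b →
    (∀ k : Int, 0 ≤ k →
        (PySem.Int.mod k 2 = 0 → 2*a ≤ k → d.get? k = none) ∧
        (PySem.Int.mod k 2 ≠ 0 → 2*b+1 ≤ k → d.get? k = none)) →
    (l.foldl pvSlotStep (d, a, b)).2.1 = a + (l.filter (fun c => pvFromIn c ["user", "function"])).length ∧
    (l.foldl pvSlotStep (d, a, b)).2.2 = b + (l.filter (fun c => pvFromIn c ["assistant"])).length ∧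
    (∀ k : Int, 0 ≤ k →
      (l.foldl pvSlotStep (d, a, b)).1.get? k =
        if PySem.Int.mod k 2 = 0 then
          (if k < 2*a then d.get? k else (l.filter (fun c => pvFromIn c ["user", "function"]))[((k - 2*a).toNat / 2)]?)
        else
          (if k < 2*b+1 then d.get? k else (l.filter (fun c => pvFromIn c ["assistant"]))[((k - 2*b - 1).toNat / 2)]?)) := by
  induction l with
  | nil =>
    intro d a b ha hb hd
    refine ⟨by simp, by simp, ?_⟩
    intro k hk
    rcases hd k hk with ⟨h0, h1⟩
    simp only [List.foldl_nil, List.filter_nil]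
    rcases PySem.Int.mod_two_eq k with hm | hm
    · rw [if_pos hm]
      split_ifs with hlt
      · rfl
      · simp [h0 hm (by omega)]
    · rw [if_neg (show ¬ PySem.Int.mod k 2 = 0 by omega)]
      split_ifs with hlt
      · rfl
      · simp [h1 (by omega) (by omega)]
  | cons c t ih =>
    intro d a b ha hb hd
    rcases Bool.eq_false_or_eq_true (pvFromIn c ["user", "function"]) with h1 | h1
    · -- c is an odd (user/function) turn
      have h2 := pv_excl c h1
      have step : pvSlotStep (d, a, b) c = (d.insert (2 * a) c, a + 1, b) := by
        simp [pvSlotStep, h1]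
      have heven : PySem.Int.mod (2*a) 2 = 0 :=
        (PySem.Int.mod_eq_zero_iff_dvd (2*a) 2).2 ⟨a, rfl⟩
      have hd' : ∀ k : Int, 0 ≤ k →
          (PySem.Int.mod k 2 = 0 → 2*(a+1) ≤ k → (d.insert (2 * a) c).get? k = none) ∧
          (PySem.Int.mod k 2 ≠ 0 → 2*b+1 ≤ k → (d.insert (2 * a) c).get? k = none) := by
        intro k hk
        rcases hd k hk with ⟨g0, g1⟩
        constructor
        · intro hm hle
          rw [PySem.Dict.get?_insert, if_neg (by omega)]
          exact g0 hm (by omega)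
        · intro hm hle
          have hne : k ≠ 2 * a := by intro he; rw [he] at hm; exact hm heven
          rw [PySem.Dict.get?_insert, if_neg hne]
          exact g1 hm hle
      obtain ⟨ia, ib, ig⟩ := ih (d.insert (2 * a) c) (a+1) b (by omega) hb hd'
      simp only [List.foldl_cons, step, List.filter_cons, h1, h2, if_pos, Bool.false_eq_true,
        if_false, List.length_cons]
      refine ⟨by rw [ia]; push_cast; ring, by rw [ib], ?_⟩
      intro k hk
      rw [ig k hk]
      rcases PySem.Int.mod_two_eq k with hm | hm
      · have hdvd : (2:Int) ∣ k := (PySem.Int.mod_eq_zero_iff_dvd k 2).1 hm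
        rw [if_pos hm, if_pos hm]
        by_cases hlt : k < 2*a
        · rw [if_pos (show k < 2*(a+1) by omega), if_pos hlt,
            PySem.Dict.get?_insert, if_neg (show k ≠ 2*a by omega)]
        · by_cases heq : k = 2*a
          · rw [if_pos (show k < 2*(a+1) by omega), if_neg hlt,
              PySem.Dict.get?_insert, if_pos heq,
              show (k - 2*a).toNat / 2 = 0 by omega]
            simp
          · rw [if_neg (show ¬ k < 2*(a+1) by omega), if_neg hlt,
              show (k - 2*a).toNat / 2 = ((k - 2*(a+1)).toNat / 2) + 1 by omega,
              List.getElem?_cons_succ]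
      · have hm0 : ¬ PySem.Int.mod k 2 = 0 := by omega
        have hndvd : ¬ (2:Int) ∣ k := by
          intro hdv; exact hm0 ((PySem.Int.mod_eq_zero_iff_dvd k 2).2 hdv)
        rw [if_neg hm0, if_neg hm0]
        split_ifs with hlt
        · rw [PySem.Dict.get?_insert, if_neg (show k ≠ 2*a by omega)]
        · rfl
    · rcases Bool.eq_false_or_eq_true (pvFromIn c ["assistant"]) with h2 | h2
      · -- c is an assistant turn
        have step : pvSlotStep (d, a, b) c = (d.insert (2 * b + 1) c, a, b + 1) := by
          simp [pvSlotStep, h1, h2]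
        have hd' : ∀ k : Int, 0 ≤ k →
            (PySem.Int.mod k 2 = 0 → 2*a ≤ k → (d.insert (2 * b + 1) c).get? k = none) ∧
            (PySem.Int.mod k 2 ≠ 0 → 2*(b+1)+1 ≤ k → (d.insert (2 * b + 1) c).get? k = none) := by
          intro k hk
          rcases hd k hk with ⟨g0, g1⟩
          constructor
          · intro hm hle
            have hdvd : (2:Int) ∣ k := (PySem.Int.mod_eq_zero_iff_dvd k 2).1 hm
            rw [PySem.Dict.get?_insert, if_neg (show k ≠ 2*b+1 by omega)]
            exact g0 hm hle
          · intro hm hle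
            rw [PySem.Dict.get?_insert, if_neg (by omega)]
            exact g1 hm (by omega)
        obtain ⟨ia, ib, ig⟩ := ih (d.insert (2 * b + 1) c) a (b+1) ha (by omega) hd'
        simp only [List.foldl_cons, step, List.filter_cons, h1, h2, if_pos, Bool.false_eq_true,
          if_false, List.length_cons]
        refine ⟨by rw [ia], by rw [ib]; push_cast; ring, ?_⟩
        intro k hk
        rw [ig k hk]
        rcases PySem.Int.mod_two_eq k with hm | hm
        · have hdvd : (2:Int) ∣ k := (PySem.Int.mod_eq_zero_iff_dvd k 2).1 hm
          rw [if_pos hm, if_pos hm]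
          split_ifs with hlt
          · rw [PySem.Dict.get?_insert, if_neg (show k ≠ 2*b+1 by omega)]
          · rfl
        · have hm0 : ¬ PySem.Int.mod k 2 = 0 := by omega
          have hemod : k % 2 = 1 := by
            rw [← PySem.Int.mod_eq_emod_of_pos (by omega : (0:Int) < 2)]; exact hm
          rw [if_neg hm0, if_neg hm0]
          by_cases hlt : k < 2*b+1
          · rw [if_pos (show k < 2*(b+1)+1 by omega), if_pos hlt,
              PySem.Dict.get?_insert, if_neg (show k ≠ 2*b+1 by omega)]
          · by_cases heq : k = 2*b+1
            · rw [if_pos (show k < 2*(b+1)+1 by omega), if_neg hlt,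
                PySem.Dict.get?_insert, if_pos heq,
                show (k - 2*b - 1).toNat / 2 = 0 by omega]
              simp
            · rw [if_neg (show ¬ k < 2*(b+1)+1 by omega), if_neg hlt,
                show (k - 2*b - 1).toNat / 2 = ((k - 2*(b+1) - 1).toNat / 2) + 1 by omega,
                List.getElem?_cons_succ]
      · -- c has some other role: skipped by both sides
        have step : pvSlotStep (d, a, b) c = (d, a, b) := by
          simp [pvSlotStep, h1, h2]
        obtain ⟨ia, ib, ig⟩ := ih d a b ha hb hd
        simp only [List.foldl_cons, step, List.filter_cons, h1, h2, Bool.false_eq_true, if_false]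
        exact ⟨ia, ib, ig⟩

-- range(2*M) mapped equals pairwise flatMap over range(M)
theorem pv_range_pair {X : Type} (M : Nat) (g : Nat → X) :
    (List.range (2*M)).map g = (List.range M).flatMap (fun i => [g (2*i), g (2*i+1)]) := by
  induction M with
  | zero => simp
  | succ m ih =>
    have : 2 * (m+1) = (2*m + 1) + 1 := by ring
    rw [this, List.range_succ, List.range_succ, List.range_succ]
    simp [ih, List.flatMap_append]

-- reading a slot with the parity default is exactly A's guarded pick
theorem pv_getD_odd (O : List (List (String × String))) (i : Nat) :
    (O[i]?).getD pvPadUser = pvPickOdd O i := by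
  unfold pvPickOdd
  split_ifs with h
  · simp [List.getD_eq_getElem?_getD, List.getElem?_eq_getElem h]
  · rw [List.getElem?_eq_none (by omega)]; rfl

theorem pv_getD_even (E : List (List (String × String))) (i : Nat) :
    (E[i]?).getD pvPadAsst = pvPickEven E i := by
  unfold pvPickEven
  split_ifs with h
  · simp [List.getD_eq_getElem?_getD, List.getElem?_eq_getElem h]
  · rw [List.getElem?_eq_none (by omega)]; rfl

-- the per-item core: B's slot-table fill equals A's interleaving loop
theorem pv_item (l : List (List (String × String))) :
    (PySem.List.pyRange 0
        (2 * max (l.foldl pvSlotStep (PySem.Dict.empty, 0, 0)).2.1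
                 (l.foldl pvSlotStep (PySem.Dict.empty, 0, 0)).2.2) 1).map (fun i =>
      (l.foldl pvSlotStep (PySem.Dict.empty, 0, 0)).1.getD i
        (if PySem.Int.mod i 2 = 0 then pvPadUser else pvPadAsst)) =
    (List.range (Nat.max (l.filter (fun c => pvFromIn c ["user", "function"])).length
                         (l.filter (fun c => pvFromIn c ["assistant"])).length)).foldl
      (fun acc i => (acc ++ [pvPickOdd (l.filter (fun c => pvFromIn c ["user", "function"])) i])
        ++ [pvPickEven (l.filter (fun c => pvFromIn c ["assistant"])) i]) [] := by
  obtain ⟨ha, hb, hg⟩ := pv_fold l PySem.Dict.empty 0 0 (le_refl 0) (le_refl 0)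
    (by intro k hk; exact ⟨fun _ _ => PySem.Dict.get?_empty k, fun _ _ => PySem.Dict.get?_empty k⟩)
  set O := l.filter (fun c => pvFromIn c ["user", "function"]) with hO
  set E := l.filter (fun c => pvFromIn c ["assistant"]) with hE
  rw [pv_foldl_flat2, List.nil_append]
  have hcast : 2 * max (l.foldl pvSlotStep (PySem.Dict.empty, 0, 0)).2.1
      (l.foldl pvSlotStep (PySem.Dict.empty, 0, 0)).2.2
      = ((2 * Nat.max O.length E.length : Nat) : Int) := by
    rw [ha, hb]; push_cast; omega
  rw [hcast, PySem.List.pyRange_zero_nat, List.map_map,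
    pv_range_pair (Nat.max O.length E.length)]
  refine congrArg (fun f => List.flatMap f (List.range (Nat.max O.length E.length))) (funext ?_)
  intro i
  dsimp only [Function.comp]
  have hmodE : PySem.Int.mod ((2*i : Nat) : Int) 2 = 0 := by
    have h := PySem.Int.mod_natCast (2*i) 2
    rw [show (2*i) % 2 = 0 by omega] at h
    exact_mod_cast h
  have hmodO : PySem.Int.mod ((2*i+1 : Nat) : Int) 2 = 1 := by
    have h := PySem.Int.mod_natCast (2*i+1) 2
    rw [show (2*i+1) % 2 = 1 by omega] at h
    exact_mod_cast h
  have he := hg ((2*i : Nat) : Int) (by positivity)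
  have ho := hg ((2*i+1 : Nat) : Int) (by positivity)
  rw [if_pos hmodE, if_neg (show ¬ ((2*i : Nat) : Int) < 2*0 by omega),
    show (((2*i : Nat) : Int) - 2*0).toNat / 2 = i by omega] at he
  rw [if_neg (show ¬ PySem.Int.mod ((2*i+1 : Nat) : Int) 2 = 0 by rw [hmodO]; omega),
    if_neg (show ¬ ((2*i+1 : Nat) : Int) < 2*0+1 by omega),
    show (((2*i+1 : Nat) : Int) - 2*0 - 1).toNat / 2 = i by omega] at ho
  push_cast at he ho hmodE hmodO ⊢
  rw [PySem.Dict.getD_eq_get?_getD, PySem.Dict.getD_eq_get?_getD, he, ho, if_pos hmodE]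
  rw [if_neg (show ¬ PySem.Int.mod (2 * (i:Int) + 1) 2 = 0 by omega)]
  rw [pv_getD_odd, pv_getD_even]

-- ===== VERDICT (by name: the statement is the Claim_ definition above) =====
theorem rearrange_conversations_spec : Claim_equal_rearrange_conversations := by
  intro data _
  unfold Spec_rearrange_conversations rearrange_conversations rearrange_conversations_alt
  apply List.map_congr_left
  intro item _
  exact congrArg (fun R => ((PySem.Dict.mk item).insert "conversations" R).items)
    (pv_item (((PySem.Dict.mk item).get? "conversations").getD [])).symm
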